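-- pv_equiv track=rewrite | github.com/Agentic-Environmental-Engineering/GymVerse | gem/gem/envs/RLVE/shortest_unicolor_substring_env.py | _max_run_length
-- ===== SOURCE A (Python) =====
-- def _max_run_length(T: str) -> int:
--     """Compute the maximum length of consecutive equal characters in T."""
--     if not T:
--         return 0
--     max_len = 1
--     cur = 1
--     for i in range(1, len(T)):
--         if T[i] == T[i - 1]:
--             cur += 1
--             if cur > max_len:
--                 max_len = cur
--         else:
--             cur = 1
--     return max_len
-- ===== SOURCE B (Python) =====
-- def _max_run_length(T: str) -> int:
--     """Compute the maximum length of consecutive equal characters in T."""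
--     best = 0
--     i = 0
--     n = len(T)
--     while i < n:
--         j = i + 1
--         while j < n and T[j] == T[i]:
--             j += 1
--         best = max(best, j - i)
--         i = j
--     return best
-- ===== Notes on version B (the rewrite author's own statement) =====
-- stated objective: alternative
-- what changed: Replaces A's per-character scan with a running counter and max-so-far updates by a two-pointer run-by-run scan: an outer loop jumps from run start to run start, an inner scan finds each run's end, and the maximum is a reduction over run lengths (empty string falls out naturally with no guard).
import Mathlib
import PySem

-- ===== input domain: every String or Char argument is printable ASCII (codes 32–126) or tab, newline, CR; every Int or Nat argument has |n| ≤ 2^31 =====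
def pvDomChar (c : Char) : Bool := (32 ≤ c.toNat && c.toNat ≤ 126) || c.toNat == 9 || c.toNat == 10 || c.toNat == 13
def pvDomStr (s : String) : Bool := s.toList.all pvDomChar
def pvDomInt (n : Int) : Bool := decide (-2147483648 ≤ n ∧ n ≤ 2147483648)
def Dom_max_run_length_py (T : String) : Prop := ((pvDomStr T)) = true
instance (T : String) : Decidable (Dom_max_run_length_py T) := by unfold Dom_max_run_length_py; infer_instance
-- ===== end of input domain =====

-- B replaces A's per-character counter scan by a two-pointer run-by-run scan (alternative decomposition, same cost).


-- ===== PORT A =====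
-- loop body of A: state (max_len, cur), index i; T[i] / T[i-1] via pyGet? (always in range here)
def stepA (l : List Char) (st : Int × Int) (i : Int) : Int × Int :=
  if PySem.List.pyGet? l i == PySem.List.pyGet? l (i - 1) then
    let cur := st.2 + 1
    if cur > st.1 then (cur, cur) else (st.1, cur)
  else (st.1, 1)

def max_run_length_py (T : String) : Int :=
  if T.toList = [] then 0
  else ((PySem.List.pyRange 1 (PySem.Str.len T) 1).foldl (stepA T.toList) (1, 1)).1

-- ===== PORT B =====
-- inner while: number of chars after the run's start still equal to it (j - i - 1)
def runLenB (c : Char) : List Char → Nat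
  | [] => 0
  | d :: rest => if d == c then runLenB c rest + 1 else 0

theorem runLenB_le (c : Char) (l : List Char) : runLenB c l ≤ l.length := by
  induction l with
  | nil => simp [runLenB]
  | cons d rest ih => simp only [runLenB, List.length_cons]; split <;> omega

-- outer while: best = max(best, j - i), then i = j (drop the run)
def loopB : Int → List Char → Int
  | best, [] => best
  | best, c :: rest =>
      let k := runLenB c rest
      loopB (max best ((k : Int) + 1)) (rest.drop k)
termination_by _ l => l.length
decreasing_by
  simp only [List.length_drop, List.length_cons]
  have := runLenB_le c rest; omega

def max_run_length_py_alt (T : String) : Int := loopB 0 T.toList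

-- ===== PRECONDITION & SPEC =====
def Spec_max_run_length_py (T : String) (out : Int) : Prop := out = max_run_length_py_alt T
instance (T : String) (out : Int) : Decidable (Spec_max_run_length_py T out) := by unfold Spec_max_run_length_py; infer_instance

-- ===== CLAIM (what is proved, stated in full; the proofs are below) =====
def Claim_equal_max_run_length_py : Prop := ∀ (T : String), Dom_max_run_length_py T → Spec_max_run_length_py T (max_run_length_py T)

-- ===== LEMMAS AND PROOFS =====

-- A's loop rewritten as structural recursion on the remaining characters with the previous char
def fA : List Char → Char → Int → Int → Int × Int
  | [], _, maxl, cur => (maxl, cur)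
  | c :: rest, prev, maxl, cur =>
      if c == prev then
        if cur + 1 > maxl then fA rest c (cur + 1) (cur + 1) else fA rest c maxl (cur + 1)
      else fA rest c maxl 1

theorem loopB_nonneg : ∀ (best : Int) (l : List Char), 0 ≤ best → 0 ≤ loopB best l
  | best, [], h => by rw [loopB]; exact h
  | best, c :: rest, h => by
      rw [loopB]
      exact loopB_nonneg _ _ (le_trans h (le_max_left _ _))
termination_by _ l => l.length
decreasing_by
  simp only [List.length_drop, List.length_cons]
  have := runLenB_le c rest; omega

theorem loopB_acc : ∀ (best : Int) (l : List Char), 0 ≤ best → loopB best l = max best (loopB 0 l)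
  | best, [], h => by rw [loopB, loopB]; omega
  | best, c :: rest, h => by
      rw [loopB, loopB]
      rw [loopB_acc (max best _) (rest.drop (runLenB c rest)) (by positivity),
          loopB_acc (max 0 _) (rest.drop (runLenB c rest)) (by positivity)]
      omega
termination_by _ l => l.length
decreasing_by
  all_goals simp only [List.length_drop, List.length_cons]
  all_goals (have := runLenB_le c rest; omega)

-- the fold over indices equals fA on the dropped suffix
theorem bridge (l : List Char) (a : Nat) (ha : 1 ≤ a) (hle : a ≤ l.length)
    (maxl cur : Int) (h1 : a - 1 < l.length) :
    (PySem.List.pyRange (a : Int) (l.length : Int) 1).foldl (stepA l) (maxl, cur)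
      = fA (l.drop a) l[a - 1] maxl cur := by
  by_cases heq : a = l.length
  · subst heq
    rw [PySem.List.pyRange_one_eq_nil (by omega)]
    simp [List.drop_of_length_le, fA]
  · have hlt : a < l.length := by omega
    rw [PySem.List.pyRange_one_cons (by exact_mod_cast hlt)]
    rw [List.foldl_cons]
    have hget : PySem.List.pyGet? l (a : Int) = some l[a] := by
      rw [PySem.List.pyGet?_natCast]; exact List.getElem?_eq_getElem hlt
    have hcast : (a : Int) - 1 = ((a - 1 : Nat) : Int) := by omega
    have hget' : PySem.List.pyGet? l ((a : Int) - 1) = some l[a - 1] := by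
      rw [hcast, PySem.List.pyGet?_natCast]; exact List.getElem?_eq_getElem h1
    have hdrop : l.drop a = l[a] :: l.drop (a + 1) := List.drop_eq_getElem_cons hlt
    have hstep : ((a : Int) + 1) = ((a + 1 : Nat) : Int) := by omega
    rw [hdrop]
    have hib := bridge l (a + 1) (by omega) (by omega)
    rw [← hstep] at hib
    simp only [Nat.add_sub_cancel] at hib
    by_cases hc : l[a] = l[a - 1]
    · have hbeq : (PySem.List.pyGet? l (a : Int) == PySem.List.pyGet? l ((a : Int) - 1)) = true := by
        rw [hget, hget', hc]; simp
      rw [fA, if_pos (by simp [hc])]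
      by_cases hcur : cur + 1 > maxl
      · have hs : stepA l (maxl, cur) (a : Int) = (cur + 1, cur + 1) := by
          simp only [stepA, hbeq, if_true]
          exact if_pos hcur
        rw [hs, if_pos hcur, hib (cur + 1) (cur + 1) (by omega)]
      · have hs : stepA l (maxl, cur) (a : Int) = (maxl, cur + 1) := by
          simp only [stepA, hbeq, if_true]
          exact if_neg hcur
        rw [hs, if_neg hcur, hib maxl (cur + 1) (by omega)]
    · have hbeq : (PySem.List.pyGet? l (a : Int) == PySem.List.pyGet? l ((a : Int) - 1)) = false := by
        rw [hget, hget']; simp [hc]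
      have hs : stepA l (maxl, cur) (a : Int) = (maxl, 1) := by
        simp only [stepA, hbeq, Bool.false_eq_true, if_false]
      rw [hs, fA, if_neg (by simp [hc]), hib maxl 1 (by omega)]
termination_by l.length - a
decreasing_by all_goals omega

-- fA computes: max of max-so-far, current run extended to its end, and the rest run-by-run
theorem fA_eq_loopB (rest : List Char) : ∀ (prev : Char) (maxl cur : Int),
    1 ≤ cur → cur ≤ maxl →
    (fA rest prev maxl cur).1
      = max maxl (max (cur + (runLenB prev rest : Int)) (loopB 0 (rest.drop (runLenB prev rest)))) := by
  induction rest with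
  | nil =>
      intro prev maxl cur h1 h2
      simp only [fA, runLenB, List.drop_nil, loopB]
      omega
  | cons c rest ih =>
      intro prev maxl cur h1 h2
      by_cases hc : c = prev
      · subst hc
        rw [fA, if_pos (by simp)]
        have hrun : runLenB c (c :: rest) = runLenB c rest + 1 := by
          simp [runLenB]
        rw [hrun]
        have hdrop : (c :: rest).drop (runLenB c rest + 1) = rest.drop (runLenB c rest) := rfl
        rw [hdrop]
        split
        · rw [ih c (cur + 1) (cur + 1) (by omega) (by omega)]
          push_cast; omega
        · rw [ih c maxl (cur + 1) (by omega) (by omega)]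
          push_cast; omega
      · rw [fA, if_neg (by simp [hc])]
        have hrun : runLenB prev (c :: rest) = 0 := by
          simp [runLenB, hc]
        rw [hrun, ih c maxl 1 (by omega) (by omega)]
        simp only [List.drop_zero]
        have hB : loopB 0 (c :: rest)
            = max (max 0 ((runLenB c rest : Int) + 1)) (loopB 0 (rest.drop (runLenB c rest))) := by
          rw [loopB]; exact loopB_acc _ _ (le_max_left 0 _)
        have hnn : 0 ≤ loopB 0 (rest.drop (runLenB c rest)) := loopB_nonneg _ _ le_rfl
        rw [hB]
        omega

-- ===== VERDICT (by name: the statement is the Claim_ definition above) =====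
theorem max_run_length_py_spec : Claim_equal_max_run_length_py := by
  intro T _
  unfold Spec_max_run_length_py max_run_length_py max_run_length_py_alt
  cases hl : T.toList with
  | nil => simp [loopB]
  | cons c rest =>
      simp only [reduceCtorEq, if_false]
      have hlen : PySem.Str.len T = ((c :: rest).length : Int) := by
        rw [PySem.Str.len_eq, hl]
      have hb := bridge (c :: rest) 1 le_rfl (by simp) 1 1 (by simp)
      norm_num at hb
      rw [hlen]
      simp only [List.length_cons, Nat.cast_add, Nat.cast_one]
      rw [hb]
      rw [fA_eq_loopB rest c 1 1 le_rfl le_rfl]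
      have hB : loopB 0 (c :: rest)
          = max (max 0 ((runLenB c rest : Int) + 1)) (loopB 0 (rest.drop (runLenB c rest))) := by
        rw [loopB]; exact loopB_acc _ _ (le_max_left 0 _)
      have hnn : 0 ≤ loopB 0 (rest.drop (runLenB c rest)) := loopB_nonneg _ _ le_rfl
      rw [hB]
      omega
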